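-- pv_equiv track=rewrite | github.com/dvkostousov/flt_labs | knut-bendix.py | critical_pairs_from_pair
-- ===== SOURCE A (Python) =====
-- def critical_pairs_from_pair(l1, r1, l2, r2):
--     cps = []
--     n1 = len(l1); n2 = len(l2)
--     # 1) l2 встречается внутри l1
--     for pos in range(0, max(0, n1 - n2) + 1):
--         if l1[pos:pos+n2] == l2:
--             w = l1
--             s1 = r1
--             s2 = l1[:pos] + r2 + l1[pos+n2:]
--             cps.append((w, s1, s2))
--     # 2) суффикс l1 совпадает с префиксом l2
--     for k in range(1, min(n1, n2)):
--         if l1[-k:] == l2[:k]: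
--             w = l1 + l2[k:]
--             s1 = r1 + l2[k:]
--             s2 = l1[:-k] + r2
--             cps.append((w, s1, s2))
--     return cps
-- ===== SOURCE B (Python) =====
-- def critical_pairs_from_pair(l1, r1, l2, r2):
--     # One Knuth-Morris-Pratt prefix-function pass over l2 + sentinel + l1:
--     # occurrences of l2 inside l1 are the positions where the prefix-function
--     # value reaches len(l2), and the suffix(l1)/prefix(l2) overlaps are exactly
--     # the border chain of the whole combined string.
--     n1, n2 = len(l1), len(l2)
--     t = l2 + "\x00" + l1
--     n = len(t)
--     pi = [0] * n
--     k = 0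
--     for i in range(1, n):
--         while k > 0 and t[i] != t[k]:
--             k = pi[k - 1]
--         if t[i] == t[k]:
--             k += 1
--         pi[i] = k
--     cps = []
--     for i in range(n):
--         if pi[i] == n2:
--             pos = i - 2 * n2
--             cps.append((l1, r1, l1[:pos] + r2 + l1[pos + n2:]))
--     ks = []
--     k = pi[n - 1]
--     while k > 0:
--         if k < n1 and k < n2:
--             ks.append(k)
--         k = pi[k - 1]
--     for k in reversed(ks):
--         cps.append((l1 + l2[k:], r1 + l2[k:], l1[:-k] + r2))
--     return cps
-- ===== Notes on version B (the rewrite author's own statement) =====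
-- stated objective: alternative
-- what changed: Replaces A's two scans (per-position slice comparison for occurrences, per-length slice pair for overlaps) by a single Knuth-Morris-Pratt prefix-function pass over l2 + '\x00' + l1: occurrences of l2 in l1 are the indices where the prefix function reaches len(l2), and the suffix(l1)/prefix(l2) overlaps are exactly the border chain of the combined string.
import Mathlib
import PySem

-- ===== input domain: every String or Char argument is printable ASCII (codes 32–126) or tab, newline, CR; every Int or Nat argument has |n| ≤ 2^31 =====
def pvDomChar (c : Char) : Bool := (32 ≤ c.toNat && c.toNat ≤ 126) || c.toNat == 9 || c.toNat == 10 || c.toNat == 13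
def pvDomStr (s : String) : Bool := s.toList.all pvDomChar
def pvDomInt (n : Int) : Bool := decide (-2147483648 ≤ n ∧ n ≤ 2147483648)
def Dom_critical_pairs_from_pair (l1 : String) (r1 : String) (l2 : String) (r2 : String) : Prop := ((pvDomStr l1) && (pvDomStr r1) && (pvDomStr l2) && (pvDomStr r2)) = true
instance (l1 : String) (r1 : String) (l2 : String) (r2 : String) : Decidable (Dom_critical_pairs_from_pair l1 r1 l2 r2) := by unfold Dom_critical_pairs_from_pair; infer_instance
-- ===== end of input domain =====

-- B replaces A's two quadratic slice-comparison scans by one Knuth-Morris-Pratt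
-- prefix-function pass over l2 + '\x00' + l1 (the NUL sentinel is safe on the stated
-- printable-ASCII domain): occurrences are the indices where the prefix function reaches
-- len(l2), and the suffix/prefix overlaps are the border chain of the combined string.

-- ===== PORT A =====
def critical_pairs_from_pair (l1 : String) (r1 : String) (l2 : String) (r2 : String) : List (String × String × String) :=
  let cps : List (String × String × String) := []
  let n1 : Int := PySem.Str.len l1
  let n2 : Int := PySem.Str.len l2
  -- for pos in range(0, max(0, n1 - n2) + 1): if l1[pos:pos+n2] == l2: cps.append((l1, r1, l1[:pos] + r2 + l1[pos+n2:]))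
  let cps := (PySem.List.pyRange 0 (max 0 (n1 - n2) + 1)).foldl (fun cps pos =>
    if PySem.Str.slice l1 (some pos) (some (pos + n2)) == l2 then
      cps ++ [(l1, r1, PySem.Str.slice l1 none (some pos) ++ r2 ++ PySem.Str.slice l1 (some (pos + n2)) none)]
    else cps) cps
  -- for k in range(1, min(n1, n2)): if l1[-k:] == l2[:k]: cps.append((l1 + l2[k:], r1 + l2[k:], l1[:-k] + r2))
  let cps := (PySem.List.pyRange 1 (min n1 n2)).foldl (fun cps k =>
    if PySem.Str.slice l1 (some (-k)) none == PySem.Str.slice l2 none (some k) then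
      cps ++ [(l1 ++ PySem.Str.slice l2 (some k) none, r1 ++ PySem.Str.slice l2 (some k) none, PySem.Str.slice l1 none (some (-k)) ++ r2)]
    else cps) cps
  cps

-- ===== PORT B =====
-- while k > 0 and t[i] != t[k]: k = pi[k-1]   (the 'min … (k-1)' is only a termination
-- clamp: the computed table always has pi[k-1] ≤ k-1, so it never changes the value)
def pvDesc (pi : List Nat) (t : List Char) (c : Char) (k : Nat) : Nat :=
  if h : 0 < k ∧ t[k]? ≠ some c then pvDesc pi t c (min (pi.getD (k-1) 0) (k-1)) else k
termination_by k
decreasing_by have := h.1; omega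

-- one iteration of 'for i in range(1, n)': descend, extend on match, store pi[i]
def pvPiStep (t : List Char) (st : List Nat × Nat) (i : Nat) : List Nat × Nat :=
  let c := t.getD i (Char.ofNat 0)
  let k1 := pvDesc st.1 t c st.2
  let k2 := if t[k1]? = some c then k1 + 1 else k1
  (st.1.set i k2, k2)

-- pi = [0]*n; k = 0; for i in range(1, n): …descend…; if t[i]==t[k]: k += 1; pi[i] = k
def pvBuildPi (t : List Char) : List Nat :=
  ((List.range' 1 (t.length - 1)).foldl (pvPiStep t) (List.replicate t.length 0, 0)).1

-- k = pi[n-1]; while k > 0: if k < n1 and k < n2: ks.append(k); k = pi[k-1]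
def pvChainKs (pi : List Nat) (n1 n2 : Nat) (k : Nat) : List Nat :=
  if _h : 0 < k then
    (if k < n1 ∧ k < n2 then [k] else []) ++ pvChainKs pi n1 n2 (min (pi.getD (k-1) 0) (k-1))
  else []
termination_by k
decreasing_by have := _h; omega

def critical_pairs_from_pair_alt (l1 : String) (r1 : String) (l2 : String) (r2 : String) : List (String × String × String) :=
  let n1 : Nat := l1.toList.length
  let n2 : Nat := l2.toList.length
  let t : List Char := l2.toList ++ Char.ofNat 0 :: l1.toList
  let n : Nat := t.length
  let pi := pvBuildPi t
  -- for i in range(n): if pi[i] == n2: pos = i - 2*n2; cps.append((l1, r1, l1[:pos] + r2 + l1[pos+n2:]))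
  let cps1 := ((List.range n).filter (fun i => pi.getD i 0 == n2)).map (fun (i : Nat) =>
    (l1, r1, PySem.Str.slice l1 none (some ((i : Int) - 2 * n2)) ++ r2 ++ PySem.Str.slice l1 (some ((i : Int) - n2)) none))
  let ks := pvChainKs pi n1 n2 (pi.getD (n - 1) 0)
  -- for k in reversed(ks): cps.append((l1 + l2[k:], r1 + l2[k:], l1[:-k] + r2))
  let cps2 := ks.reverse.map (fun (k : Nat) =>
    (l1 ++ PySem.Str.slice l2 (some (k : Int)) none, r1 ++ PySem.Str.slice l2 (some (k : Int)) none,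
     PySem.Str.slice l1 none (some (-(k : Int))) ++ r2))
  cps1 ++ cps2

-- ===== PRECONDITION & SPEC =====
def Spec_critical_pairs_from_pair (l1 : String) (r1 : String) (l2 : String) (r2 : String) (out : List (String × String × String)) : Prop := out = critical_pairs_from_pair_alt l1 r1 l2 r2
instance (l1 : String) (r1 : String) (l2 : String) (r2 : String) (out : List (String × String × String)) : Decidable (Spec_critical_pairs_from_pair l1 r1 l2 r2 out) := by unfold Spec_critical_pairs_from_pair; infer_instance

-- ===== CLAIM (what is proved, stated in full; the proofs are below) =====
def Claim_equal_critical_pairs_from_pair : Prop := ∀ (l1 : String) (r1 : String) (l2 : String) (r2 : String), Dom_critical_pairs_from_pair l1 r1 l2 r2 → Spec_critical_pairs_from_pair l1 r1 l2 r2 (critical_pairs_from_pair l1 r1 l2 r2)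

-- ===== LEMMAS AND PROOFS =====

-- b is a proper border of s: the length-b prefix of s is also a suffix of s
def pvBordB (s : List Char) (b : Nat) : Bool := decide (b < s.length) && (s.take b == s.drop (s.length - b))

-- the longest proper border length of s
def pvMaxBord (s : List Char) : Nat := Nat.findGreatest (fun b => pvBordB s b = true) s.length

lemma pvBordB_iff (s : List Char) (b : Nat) :
    pvBordB s b = true ↔ b < s.length ∧ s.take b = s.drop (s.length - b) := by
  simp [pvBordB]

lemma bord_lt {s : List Char} {b : Nat} (h : pvBordB s b = true) : b < s.length :=
  ((pvBordB_iff s b).mp h).1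

lemma bord_zero {s : List Char} (h : s ≠ []) : pvBordB s 0 = true := by
  rw [pvBordB_iff]
  constructor
  · exact List.length_pos_iff.mpr h
  · simp

lemma maxBord_mem {s : List Char} (h : s ≠ []) : pvBordB s (pvMaxBord s) = true := by
  unfold pvMaxBord
  exact Nat.findGreatest_spec (P := fun b => pvBordB s b = true) (Nat.zero_le _) (bord_zero h)

lemma maxBord_max {s : List Char} {b : Nat} (h : pvBordB s b = true) : b ≤ pvMaxBord s :=
  Nat.le_findGreatest (Nat.le_of_lt (bord_lt h)) h

lemma maxBord_lt {s : List Char} (h : s ≠ []) : pvMaxBord s < s.length :=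
  bord_lt (maxBord_mem h)

-- chain lemma: below a border k of s, borders of s are exactly borders of s.take k
lemma chain_iff {s : List Char} {k b : Nat} (hk : pvBordB s k = true) (hb : b < k) :
    (pvBordB (s.take k) b = true ↔ pvBordB s b = true) := by
  obtain ⟨hk1, hk2⟩ := (pvBordB_iff s k).mp hk
  rw [pvBordB_iff, pvBordB_iff]
  have hlen : (s.take k).length = k := by rw [List.length_take]; omega
  rw [hlen]
  have h1 : (s.take k).take b = s.take b := by rw [List.take_take]; congr 1; omega
  have h2 : (s.take k).drop (k - b) = s.drop (s.length - b) := by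
    rw [hk2, List.drop_drop]; congr 1; omega
  rw [h1, h2]
  constructor
  · rintro ⟨-, h⟩; exact ⟨by omega, h⟩
  · rintro ⟨-, h⟩; exact ⟨hb, h⟩

-- extension: borders of s ++ [c] of positive length
lemma bord_ext {s : List Char} {c : Char} {b : Nat} :
    pvBordB (s ++ [c]) (b + 1) = true ↔ pvBordB s b = true ∧ s[b]? = some c := by
  rw [pvBordB_iff, pvBordB_iff]
  simp only [List.length_append, List.length_cons, List.length_nil]
  constructor
  · rintro ⟨h1, h2⟩
    have hb : b < s.length := by omega
    rw [List.take_append_of_le_length (by omega), List.take_add_one,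
        show s.length + 0 + 1 - (b + 1) = s.length - b by omega,
        List.drop_append_of_le_length (by omega),
        List.getElem?_eq_getElem hb] at h2
    simp only [Option.toList_some] at h2
    obtain ⟨heq, hlast⟩ := List.append_inj' h2 (by simp)
    have hcc : s[b] = c := by simpa using hlast
    exact ⟨⟨hb, heq⟩, by rw [List.getElem?_eq_getElem hb, hcc]⟩
  · rintro ⟨⟨hb, heq⟩, hsb⟩
    refine ⟨by omega, ?_⟩
    rw [List.take_append_of_le_length (by omega), List.take_add_one,
        show s.length + 0 + 1 - (b + 1) = s.length - b by omega,
        List.drop_append_of_le_length (by omega), hsb, heq]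
    simp

-- descent correctness
lemma desc_spec (pi : List Nat) (t : List Char) (c : Char) (i : Nat)
    (hi2 : i ≤ t.length)
    (piOK : ∀ j, j + 1 < i → pi.getD j 0 = pvMaxBord (t.take (j + 1))) :
    ∀ k, pvBordB (t.take i) k = true →
      (∀ b, pvBordB (t.take i) b = true → k < b → ¬ t[b]? = some c) →
      pvBordB (t.take i) (pvDesc pi t c k) = true ∧
      (∀ b, pvBordB (t.take i) b = true → t[b]? = some c → b ≤ pvDesc pi t c k) ∧
      (t[pvDesc pi t c k]? = some c ∨ pvDesc pi t c k = 0) := by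
  intro k
  induction k using Nat.strong_induction_on with
  | _ k IH =>
    intro hk hNo
    by_cases h : 0 < k ∧ t[k]? ≠ some c
    · rw [pvDesc, dif_pos h]
      have hklt : k < i := by
        have := bord_lt hk; rw [List.length_take] at this; omega
      have hpik : pi.getD (k - 1) 0 = pvMaxBord (t.take k) := by
        have := piOK (k - 1) (by omega)
        rwa [show k - 1 + 1 = k by omega] at this
      have htk_ne : t.take k ≠ [] := by
        have hlen : (t.take k).length = k := by rw [List.length_take]; omega
        intro hnil
        rw [hnil] at hlen
        simp at hlen; omega
      have hmb_lt : pvMaxBord (t.take k) < k := by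
        have := maxBord_lt htk_ne
        rw [List.length_take] at this; omega
      have hk'eq : min (pi.getD (k - 1) 0) (k - 1) = pvMaxBord (t.take k) := by
        rw [hpik]; omega
      have htt : (t.take i).take k = t.take k := by
        rw [List.take_take]; congr 1; omega
      have hbk' : pvBordB (t.take i) (min (pi.getD (k - 1) 0) (k - 1)) = true := by
        rw [hk'eq]
        refine (chain_iff hk hmb_lt).mp ?_
        rw [htt]
        exact maxBord_mem htk_ne
      have hNo' : ∀ b, pvBordB (t.take i) b = true →
          min (pi.getD (k - 1) 0) (k - 1) < b → ¬ t[b]? = some c := by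
        intro b hb hlt
        rcases lt_trichotomy b k with hbk | hbk | hbk
        · intro _
          have hbord_tk : pvBordB (t.take k) b = true := by
            rw [← htt]
            exact (chain_iff hk hbk).mpr hb
          have := maxBord_max hbord_tk
          omega
        · subst hbk; exact h.2
        · exact hNo b hb (by omega)
      exact IH _ (by omega) hbk' hNo'
    · rw [pvDesc, dif_neg h]
      refine ⟨hk, ?_, ?_⟩
      · intro b hb hbc
        by_contra hlt
        exact absurd hbc (hNo b hb (by omega))
      · by_cases hk0 : k = 0
        · exact Or.inr hk0
        · left
          by_contra hc
          exact h ⟨by omega, hc⟩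

-- one build step: the new prefix-function value
lemma step_max (pi : List Nat) (t : List Char) (i : Nat) (hi : i < t.length) (hi0 : 0 < i)
    (piOK : ∀ j, j + 1 < i → pi.getD j 0 = pvMaxBord (t.take (j + 1))) :
    let c := t.getD i (Char.ofNat 0)
    let r := pvDesc pi t c (pvMaxBord (t.take i))
    pvMaxBord (t.take (i + 1)) = if t[r]? = some c then r + 1 else r := by
  intro c r
  have hc : c = t[i] := List.getD_eq_getElem t (Char.ofNat 0) hi
  have hne : t.take i ≠ [] := by
    have hlen : (t.take i).length = i := by rw [List.length_take]; omega
    intro hnil; rw [hnil] at hlen; simp at hlen; omega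
  have hk := maxBord_mem hne
  have hNo : ∀ b, pvBordB (t.take i) b = true → pvMaxBord (t.take i) < b → ¬ t[b]? = some c := by
    intro b hb hlt _
    have := maxBord_max hb; omega
  obtain ⟨hr_bord, hr_max, hr_c⟩ := desc_spec pi t c i (le_of_lt hi) piOK _ hk hNo
  have htake : t.take (i + 1) = t.take i ++ [c] := by
    rw [List.take_add_one, List.getElem?_eq_getElem hi]
    simp [hc]
  have hr_lt : pvDesc pi t c (pvMaxBord (t.take i)) < i := by
    have := bord_lt hr_bord; rw [List.length_take] at this; omega
  have hgetr : (t.take i)[pvDesc pi t c (pvMaxBord (t.take i))]? =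
      t[pvDesc pi t c (pvMaxBord (t.take i))]? := by
    rw [List.getElem?_take_of_lt hr_lt]
  have hne' : t.take (i + 1) ≠ [] := by
    have hlen : (t.take (i + 1)).length = i + 1 := by rw [List.length_take]; omega
    intro hnil; rw [hnil] at hlen; simp at hlen
  split_ifs with hrc
  · apply le_antisymm
    · by_contra hgt
      push Not at hgt
      have hM := maxBord_mem hne'
      obtain ⟨b, hb⟩ : ∃ b, pvMaxBord (t.take (i + 1)) = b + 1 := ⟨pvMaxBord (t.take (i + 1)) - 1, by omega⟩
      rw [hb, htake] at hM
      obtain ⟨h1, h2⟩ := bord_ext.mp hM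
      have hble : b ≤ r := by
        refine hr_max b h1 ?_
        have hblt : b < i := by
          have := bord_lt h1; rw [List.length_take] at this; omega
        rw [← List.getElem?_take_of_lt (l := t) hblt]
        exact h2
      omega
    · apply maxBord_max
      rw [htake]
      exact bord_ext.mpr ⟨hr_bord, by rw [hgetr]; exact hrc⟩
  · have hr0 : r = 0 := hr_c.resolve_left hrc
    rw [hr0]
    by_contra hgt
    have hM := maxBord_mem hne'
    obtain ⟨b, hb⟩ : ∃ b, pvMaxBord (t.take (i + 1)) = b + 1 :=
      ⟨pvMaxBord (t.take (i + 1)) - 1, by omega⟩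
    rw [hb, htake] at hM
    obtain ⟨h1, h2⟩ := bord_ext.mp hM
    have hble : b ≤ r := by
      refine hr_max b h1 ?_
      have hblt : b < i := by
        have := bord_lt h1; rw [List.length_take] at this; omega
      rw [← List.getElem?_take_of_lt (l := t) hblt]
      exact h2
    have hb0 : b = 0 := by omega
    apply hrc
    rw [hr0, ← hb0, ← List.getElem?_take_of_lt (l := t) (show b < i by omega)]
    exact h2

-- invariant of the pi-building fold
lemma build_inv (t : List Char) (ht : 1 ≤ t.length) :
    ∀ m, m ≤ t.length - 1 →
      (((List.range' 1 m).foldl (pvPiStep t) (List.replicate t.length 0, 0)).1.length = t.length ∧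
       ∀ j, j < m + 1 →
        ((List.range' 1 m).foldl (pvPiStep t) (List.replicate t.length 0, 0)).1.getD j 0 =
          pvMaxBord (t.take (j + 1))) ∧
      ((List.range' 1 m).foldl (pvPiStep t) (List.replicate t.length 0, 0)).2 =
        pvMaxBord (t.take (m + 1)) := by
  intro m
  induction m with
  | zero =>
    intro _
    refine ⟨⟨by simp, ?_⟩, ?_⟩
    · intro j hj
      have hj0 : j = 0 := by omega
      subst hj0
      rw [show pvMaxBord (t.take 1) = 0 by
        have hne : t.take 1 ≠ [] := by
          have hlen : (t.take 1).length = 1 := by rw [List.length_take]; omega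
          intro hnil; rw [hnil] at hlen; simp at hlen
        have := maxBord_lt hne
        rw [List.length_take] at this; omega]
      simp [List.getD, List.getElem?_replicate]
      split <;> rfl
    · rw [show pvMaxBord (t.take 1) = 0 by
        have hne : t.take 1 ≠ [] := by
          have hlen : (t.take 1).length = 1 := by rw [List.length_take]; omega
          intro hnil; rw [hnil] at hlen; simp at hlen
        have := maxBord_lt hne
        rw [List.length_take] at this; omega]
      simp
  | succ m IH =>
    intro hm
    obtain ⟨⟨IH1, IH2⟩, IH3⟩ := IH (by omega)
    rw [List.range'_1_concat, List.foldl_append, List.foldl_cons, List.foldl_nil]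
    set st := (List.range' 1 m).foldl (pvPiStep t) (List.replicate t.length 0, 0) with hst
    have hi_lt : 1 + m < t.length := by omega
    have hi0 : 0 < 1 + m := by omega
    have piOK : ∀ j, j + 1 < 1 + m → st.1.getD j 0 = pvMaxBord (t.take (j + 1)) := by
      intro j hj; exact IH2 j (by omega)
    have hsm := step_max st.1 t (1 + m) hi_lt hi0 piOK
    simp only at hsm
    rw [show t.take (1 + m) = t.take (m + 1) by rw [Nat.add_comm]] at hsm
    unfold pvPiStep
    simp only
    rw [IH3]
    refine ⟨⟨by simpa using IH1, ?_⟩, ?_⟩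
    · intro j hj
      by_cases hjm : j = 1 + m
      · subst hjm
        rw [List.getD, List.getElem?_set_self (by rw [IH1]; omega)]
        simp only [Option.getD_some]
        exact hsm.symm
      · rw [List.getD, List.getElem?_set_ne (by omega)]
        exact IH2 j (by omega)
    · rw [show m + 1 + 1 = 1 + m + 1 by omega]
      exact hsm.symm

lemma buildPi_correct (t : List Char) (ht : 1 ≤ t.length) :
    ∀ j, j < t.length → (pvBuildPi t).getD j 0 = pvMaxBord (t.take (j + 1)) := by
  intro j hj
  have := ((build_inv t ht (t.length - 1) (le_refl _)).1).2 j (by omega)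
  unfold pvBuildPi
  exact this


-- ---- structure of the combined string t = P ++ sep :: T ----

lemma t_get_sep (P T : List Char) : (P ++ Char.ofNat 0 :: T)[P.length]? = some (Char.ofNat 0) := by
  rw [List.getElem?_append_right (le_refl _)]
  simp

lemma t_get_T (P T : List Char) (k : Nat) :
    (P ++ Char.ofNat 0 :: T)[P.length + 1 + k]? = T[k]? := by
  rw [List.getElem?_append_right (by omega)]
  rw [show P.length + 1 + k - P.length = k + 1 by omega]
  simp

lemma t_drop_T (P T : List Char) (k : Nat) :
    (P ++ Char.ofNat 0 :: T).drop (P.length + 1 + k) = T.drop k := by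
  rw [List.drop_append, List.drop_eq_nil_of_le (by omega), List.nil_append,
      show P.length + 1 + k - P.length = k + 1 by omega, List.drop_succ_cons]

lemma t_len (P T : List Char) : (P ++ Char.ofNat 0 :: T).length = P.length + 1 + T.length := by
  simp; omega

-- no border of a prefix of t can be longer than |P| (the sentinel blocks it)
lemma no_big (P T : List Char) (hT : ∀ c ∈ T, c ≠ Char.ofNat 0) (i : Nat)
    (hi : i < (P ++ Char.ofNat 0 :: T).length) (b : Nat)
    (hb : pvBordB ((P ++ Char.ofNat 0 :: T).take (i + 1)) b = true) : b ≤ P.length := by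
  by_contra hgt
  push Not at hgt
  obtain ⟨hblt, heq⟩ := (pvBordB_iff _ _).mp hb
  have hlen : ((P ++ Char.ofNat 0 :: T).take (i + 1)).length = i + 1 := by
    rw [List.length_take]; omega
  rw [hlen] at hblt heq
  have h1 : (((P ++ Char.ofNat 0 :: T).take (i + 1)).take b)[P.length]? = some (Char.ofNat 0) := by
    rw [List.getElem?_take_of_lt hgt, List.getElem?_take_of_lt (by omega), t_get_sep]
  have h2 : (((P ++ Char.ofNat 0 :: T).take (i + 1)).drop (i + 1 - b))[P.length]? = T[i - b]? := by
    rw [List.getElem?_drop, List.getElem?_take_of_lt (by omega),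
        show i + 1 - b + P.length = P.length + 1 + (i - b) by omega]
    exact t_get_T P T (i - b)
  rw [heq] at h1
  rw [h1] at h2
  obtain ⟨hlt2, hEq⟩ := List.getElem?_eq_some_iff.mp h2.symm
  exact hT _ (hEq ▸ List.getElem_mem hlt2) rfl

-- pi hits |P| exactly at the ends of occurrences of P inside T
lemma occ_iff (P T : List Char) (hP : ∀ c ∈ P, c ≠ Char.ofNat 0)
    (hT : ∀ c ∈ T, c ≠ Char.ofNat 0) (i : Nat) (hi : i < (P ++ Char.ofNat 0 :: T).length) :
    pvMaxBord ((P ++ Char.ofNat 0 :: T).take (i + 1)) = P.length ↔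
      2 * P.length ≤ i ∧ (T.drop (i - 2 * P.length)).take P.length = P := by
  have hne : (P ++ Char.ofNat 0 :: T).take (i + 1) ≠ [] := by
    have hlen : ((P ++ Char.ofNat 0 :: T).take (i + 1)).length = i + 1 := by
      rw [List.length_take]; omega
    intro hnil; rw [hnil] at hlen; simp at hlen
  have hstep1 : pvMaxBord ((P ++ Char.ofNat 0 :: T).take (i + 1)) = P.length ↔
      pvBordB ((P ++ Char.ofNat 0 :: T).take (i + 1)) P.length = true := by
    constructor
    · intro h; rw [← h]; exact maxBord_mem hne
    · intro h
      have h1 := maxBord_max h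
      have h2 := no_big P T hT i hi _ (maxBord_mem hne)
      omega
  rw [hstep1, pvBordB_iff]
  have hlen : ((P ++ Char.ofNat 0 :: T).take (i + 1)).length = i + 1 := by
    rw [List.length_take]; omega
  rw [hlen]
  by_cases hc : 2 * P.length ≤ i
  · have htake1 : ((P ++ Char.ofNat 0 :: T).take (i + 1)).take P.length = P := by
      rw [List.take_take, min_eq_left (by omega)]; exact List.take_left
    have hdrop1 : ((P ++ Char.ofNat 0 :: T).take (i + 1)).drop (i + 1 - P.length) =
        (T.drop (i - 2 * P.length)).take P.length := by
      rw [List.drop_take, show i + 1 - (i + 1 - P.length) = P.length by omega,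
          show i + 1 - P.length = P.length + 1 + (i - 2 * P.length) by omega, t_drop_T]
    rw [htake1, hdrop1]
    constructor
    · rintro ⟨-, h⟩; exact ⟨hc, h.symm⟩
    · rintro ⟨-, h⟩; exact ⟨by omega, h.symm⟩
  · constructor
    · rintro ⟨hlt, heq⟩
      exfalso
      have hL0 : 0 < P.length := by omega
      have htkL : ((P ++ Char.ofNat 0 :: T).take (i + 1)).take P.length = P := by
        rw [List.take_take, min_eq_left (by omega)]; exact List.take_left
      rw [htkL] at heq
      have h2 : (((P ++ Char.ofNat 0 :: T).take (i + 1)).drop (i + 1 - P.length))[P.length - (i + 1 - P.length)]? =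
          some (Char.ofNat 0) := by
        rw [List.getElem?_drop, List.getElem?_take_of_lt (by omega),
            show i + 1 - P.length + (P.length - (i + 1 - P.length)) = P.length by omega, t_get_sep]
      rw [← heq] at h2
      obtain ⟨hlt2, hEq⟩ := List.getElem?_eq_some_iff.mp h2
      exact hP _ (hEq ▸ List.getElem_mem hlt2) rfl
    · rintro ⟨h, -⟩; exact absurd h hc

-- borders of the whole t below min(|T|,|P|) are exactly the suffix/prefix overlaps
lemma bord_t_iff (P T : List Char) (k : Nat) (hk1 : k < T.length) (hk2 : k < P.length) :
    (pvBordB (P ++ Char.ofNat 0 :: T) k = true ↔ T.drop (T.length - k) = P.take k) := by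
  rw [pvBordB_iff, t_len]
  have h1 : (P ++ Char.ofNat 0 :: T).take k = P.take k :=
    List.take_append_of_le_length (by omega)
  have h2 : (P ++ Char.ofNat 0 :: T).drop (P.length + 1 + T.length - k) = T.drop (T.length - k) := by
    rw [show P.length + 1 + T.length - k = P.length + 1 + (T.length - k) by omega, t_drop_T]
  rw [h1, h2]
  constructor
  · rintro ⟨-, h⟩; exact h.symm
  · rintro h; exact ⟨by omega, h.symm⟩

-- the while-loop over the border chain lists exactly the filtered borders, descending
lemma chain_spec (P T : List Char) (pi : List Nat)
    (piOK : ∀ j, j < (P ++ Char.ofNat 0 :: T).length →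
      pi.getD j 0 = pvMaxBord ((P ++ Char.ofNat 0 :: T).take (j + 1))) :
    ∀ k, (k = 0 ∨ pvBordB (P ++ Char.ofNat 0 :: T) k = true) →
      pvChainKs pi T.length P.length k =
        ((List.range' 1 k).filter (fun b =>
          pvBordB (P ++ Char.ofNat 0 :: T) b && decide (b < T.length) && decide (b < P.length))).reverse := by
  intro k
  induction k using Nat.strong_induction_on with
  | _ k IH =>
    intro hk
    by_cases hk0 : k = 0
    · subst hk0; rw [pvChainKs]; simp
    · have hbord : pvBordB (P ++ Char.ofNat 0 :: T) k = true := hk.resolve_left hk0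
      have hklt : k < (P ++ Char.ofNat 0 :: T).length := bord_lt hbord
      rw [pvChainKs, dif_pos (by omega : 0 < k)]
      have hpik : pi.getD (k - 1) 0 = pvMaxBord ((P ++ Char.ofNat 0 :: T).take k) := by
        have := piOK (k - 1) (by omega)
        rwa [show k - 1 + 1 = k by omega] at this
      have htkne : (P ++ Char.ofNat 0 :: T).take k ≠ [] := by
        have hlen : ((P ++ Char.ofNat 0 :: T).take k).length = k := by
          rw [List.length_take]; omega
        intro hnil; rw [hnil] at hlen; simp at hlen; omega
      have hmb_lt : pvMaxBord ((P ++ Char.ofNat 0 :: T).take k) < k := by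
        have := maxBord_lt htkne; rw [List.length_take] at this; omega
      have hmin : min (pi.getD (k - 1) 0) (k - 1) = pvMaxBord ((P ++ Char.ofNat 0 :: T).take k) := by
        rw [hpik]; omega
      rw [hmin]
      have hbord' : pvBordB (P ++ Char.ofNat 0 :: T) (pvMaxBord ((P ++ Char.ofNat 0 :: T).take k)) = true :=
        (chain_iff hbord hmb_lt).mp (maxBord_mem htkne)
      rw [IH _ (by omega) (Or.inr hbord')]
      set k' := pvMaxBord ((P ++ Char.ofNat 0 :: T).take k) with hk'
      have hsplit : List.range' 1 k = List.range' 1 k' ++ (List.range' (1 + k') (k - k' - 1) ++ [k]) := by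
        have h1 : List.range' (1 + k') (k - k' - 1) ++ [1 + k' + (k - k' - 1)] =
            List.range' (1 + k') (k - k' - 1 + 1) := (List.range'_1_concat).symm
        have h2 : List.range' 1 k' ++ List.range' (1 + k') (k - k' - 1 + 1) =
            List.range' 1 (k' + (k - k' - 1 + 1)) := List.range'_append_1
        rw [show 1 + k' + (k - k' - 1) = k by omega] at h1
        rw [show k' + (k - k' - 1 + 1) = k by omega] at h2
        rw [← h2, ← h1]
      rw [hsplit, List.filter_append, List.filter_append]
      have hmid : (List.range' (1 + k') (k - k' - 1)).filter (fun b =>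
          pvBordB (P ++ Char.ofNat 0 :: T) b && decide (b < T.length) && decide (b < P.length)) = [] := by
        rw [List.filter_eq_nil_iff]
        intro b hb
        obtain ⟨hb1, hb2⟩ := List.mem_range'_1.mp hb
        intro hq
        have hqb : pvBordB (P ++ Char.ofNat 0 :: T) b = true := by
          revert hq; cases pvBordB (P ++ Char.ofNat 0 :: T) b <;> simp
        have : pvBordB ((P ++ Char.ofNat 0 :: T).take k) b = true :=
          (chain_iff hbord (by omega)).mpr hqb
        have := maxBord_max this
        omega
      have hlast : List.filter (fun b =>
          pvBordB (P ++ Char.ofNat 0 :: T) b && decide (b < T.length) && decide (b < P.length)) [k] =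
          if k < T.length ∧ k < P.length then [k] else [] := by
        split_ifs with hcond
        · simp [List.filter, hbord, hcond.1, hcond.2]
        · simp only [List.filter, hbord]
          rcases Nat.lt_or_ge k T.length with h1 | h1 <;>
            rcases Nat.lt_or_ge k P.length with h2 | h2
          · exact absurd ⟨h1, h2⟩ hcond
          · simp [decide_eq_false (Nat.not_lt.mpr h2)]
          · simp [decide_eq_false (Nat.not_lt.mpr h1)]
          · simp [decide_eq_false (Nat.not_lt.mpr h1)]
      rw [hmid, hlast, List.reverse_append, List.reverse_append]
      split_ifs <;> simp

lemma beq_str_iff (s t : String) : (s == t) = true ↔ s.toList = t.toList := by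
  constructor
  · intro h; exact congrArg String.toList (eq_of_beq h)
  · intro h; exact beq_iff_eq.mpr (String.toList_inj.mp h)

-- filters over an initial range are insensitive to extending past the last true
lemma filter_range'_ext (q : Nat → Bool) (m M : Nat) (hm : m ≤ M)
    (h : ∀ b, m < b → b ≤ M → q b = false) :
    (List.range' 1 M).filter q = (List.range' 1 m).filter q := by
  have hsplit : List.range' 1 M = List.range' 1 m ++ List.range' (1 + m) (M - m) := by
    rw [List.range'_append_1]
    congr 1; omega
  rw [hsplit, List.filter_append]
  have : (List.range' (1 + m) (M - m)).filter q = [] := by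
    rw [List.filter_eq_nil_iff]
    intro b hb
    have := List.mem_range'_1.mp hb
    simp [h b (by omega) (by omega)]
  rw [this, List.append_nil]


lemma dom_no_nul (s : String) (h : pvDomStr s = true) : ∀ c ∈ s.toList, c ≠ Char.ofNat 0 := by
  intro c hc hceq
  have h1 := (List.all_eq_true.mp h) c hc
  rw [hceq] at h1
  have h2 : pvDomChar (Char.ofNat 0) = false := by decide
  rw [h2] at h1
  cases h1

-- A's occurrence test as a list proposition
lemma condA_inner (l1 l2 : String) (p : Nat) :
    (PySem.Str.slice l1 (some (p : Int)) (some ((p : Int) + (l2.toList.length : Int))) == l2)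
      = decide ((l1.toList.drop p).take l2.toList.length = l2.toList) := by
  rw [Bool.eq_iff_iff, beq_str_iff]
  rw [PySem.Str.toList_slice, PySem.Chars.slice_eq_listSlice, PySem.List.slice_natCast_add]
  simp

-- A's overlap test as a list proposition
lemma condA_over (l1 l2 : String) (kk : Nat) (hkk : 0 < kk) :
    (PySem.Str.slice l1 (some (-(kk : Int))) none == PySem.Str.slice l2 none (some (kk : Int)))
      = decide (l1.toList.drop (l1.toList.length - kk) = l2.toList.take kk) := by
  rw [Bool.eq_iff_iff, beq_str_iff]
  rw [PySem.Str.toList_slice, PySem.Str.toList_slice, PySem.Chars.slice_eq_listSlice,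
      PySem.Chars.slice_eq_listSlice, PySem.List.slice_from_neg_natCast _ kk hkk,
      PySem.List.slice_to_natCast]
  simp

-- ===== VERDICT (by name: the statement is the Claim_ definition above) =====
set_option maxHeartbeats 2000000 in
theorem critical_pairs_from_pair_spec : Claim_equal_critical_pairs_from_pair := by
  intro l1 r1 l2 r2 hdom
  have hdom' : (pvDomStr l1 && pvDomStr r1 && pvDomStr l2 && pvDomStr r2) = true := hdom
  simp only [Bool.and_eq_true] at hdom'
  have hTsep : ∀ c ∈ l1.toList, c ≠ Char.ofNat 0 := dom_no_nul l1 hdom'.1.1.1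
  have hPsep : ∀ c ∈ l2.toList, c ≠ Char.ofNat 0 := dom_no_nul l2 hdom'.1.2
  unfold Spec_critical_pairs_from_pair critical_pairs_from_pair critical_pairs_from_pair_alt
  dsimp only
  rw [PySem.Str.len_eq, PySem.Str.len_eq]
  rw [PySem.List.foldl_append_if, PySem.List.foldl_append_if, List.nil_append]
  have hn : (l2.toList ++ Char.ofNat 0 :: l1.toList).length =
      l2.toList.length + 1 + l1.toList.length := t_len l2.toList l1.toList
  have ht1 : 1 ≤ (l2.toList ++ Char.ofNat 0 :: l1.toList).length := by omega
  have htne : (l2.toList ++ Char.ofNat 0 :: l1.toList) ≠ [] := by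
    intro h0; rw [h0] at hn; simp at hn; omega
  have hpi : ∀ j, j < (l2.toList ++ Char.ofNat 0 :: l1.toList).length →
      (pvBuildPi (l2.toList ++ Char.ofNat 0 :: l1.toList)).getD j 0 =
        pvMaxBord ((l2.toList ++ Char.ofNat 0 :: l1.toList).take (j + 1)) :=
    buildPi_correct _ ht1
  congr 1
  · -- occurrence lists
    have hBfilter : (List.range (l2.toList ++ Char.ofNat 0 :: l1.toList).length).filter
        (fun i => (pvBuildPi (l2.toList ++ Char.ofNat 0 :: l1.toList)).getD i 0 == l2.toList.length)
        = (List.range (l2.toList ++ Char.ofNat 0 :: l1.toList).length).filter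
        (fun i => decide (2 * l2.toList.length ≤ i ∧
          (l1.toList.drop (i - 2 * l2.toList.length)).take l2.toList.length = l2.toList)) := by
      apply List.filter_congr
      intro i hi
      have hilt := List.mem_range.mp hi
      rw [hpi i hilt, Bool.eq_iff_iff, beq_iff_eq, decide_eq_true_eq]
      exact occ_iff l2.toList l1.toList hPsep hTsep i hilt
    rw [hBfilter]
    by_cases hcase : l2.toList.length ≤ l1.toList.length
    · have hmax : max 0 ((l1.toList.length : ℤ) - (l2.toList.length : ℤ)) =
          (l1.toList.length : ℤ) - (l2.toList.length : ℤ) := by omega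
      rw [hmax]
      have hr : PySem.List.pyRange 0 ((l1.toList.length : ℤ) - (l2.toList.length : ℤ) + 1) =
          (List.range (l1.toList.length - l2.toList.length + 1)).map (fun (k : Nat) => (0 : ℤ) + (k : ℤ)) := by
        rw [PySem.List.pyRange_one,
            show ((l1.toList.length : ℤ) - (l2.toList.length : ℤ) + 1 - 0).toNat =
              l1.toList.length - l2.toList.length + 1 by omega]
      rw [hr, List.filter_map, List.map_map]
      have hsplit : List.range (l2.toList ++ Char.ofNat 0 :: l1.toList).length =
          List.range' 0 (2 * l2.toList.length) ++
          List.range' (0 + 2 * l2.toList.length)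
            ((l2.toList ++ Char.ofNat 0 :: l1.toList).length - 2 * l2.toList.length) := by
        rw [List.range_eq_range', List.range'_append_1]
        congr 1
        omega
      rw [hsplit, List.filter_append]
      have hnil1 : (List.range' 0 (2 * l2.toList.length)).filter
          (fun i => decide (2 * l2.toList.length ≤ i ∧
            (l1.toList.drop (i - 2 * l2.toList.length)).take l2.toList.length = l2.toList)) = [] := by
        rw [List.filter_eq_nil_iff]
        intro b hb
        obtain ⟨h1, h2⟩ := List.mem_range'_1.mp hb
        simp only [decide_eq_true_eq]
        rintro ⟨hc2, -⟩
        omega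
      rw [hnil1, List.nil_append,
          show (l2.toList ++ Char.ofNat 0 :: l1.toList).length - 2 * l2.toList.length =
            l1.toList.length - l2.toList.length + 1 by omega,
          List.range'_eq_map_range, List.filter_map, List.map_map]
      congr 1
      · funext p
        simp only [Function.comp]
        rw [show ((0 + 2 * l2.toList.length + p : ℕ) : ℤ) - 2 * (l2.toList.length : ℤ) =
              (0 : ℤ) + (p : ℤ) by push_cast; ring,
            show ((0 + 2 * l2.toList.length + p : ℕ) : ℤ) - (l2.toList.length : ℤ) =
              ((0 : ℤ) + (p : ℤ)) + (l2.toList.length : ℤ) by push_cast; ring]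
      · congr 1
        funext p
        simp only [Function.comp]
        rw [show ((0 : ℤ) + (p : ℤ)) + (l2.toList.length : ℤ) =
              ((p : ℕ) : ℤ) + (l2.toList.length : ℤ) by ring,
            show ((0 : ℤ) + (p : ℤ)) = ((p : ℕ) : ℤ) by ring,
            condA_inner l1 l2 p]
        rw [show 0 + 2 * l2.toList.length + p - 2 * l2.toList.length = p by omega]
        rw [Bool.eq_iff_iff, decide_eq_true_eq, decide_eq_true_eq]
        constructor
        · intro h; exact ⟨by omega, h⟩
        · rintro ⟨-, h⟩; exact h
    · have hmax : max 0 ((l1.toList.length : ℤ) - (l2.toList.length : ℤ)) = 0 := by omega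
      rw [hmax]
      have hA0 : PySem.List.pyRange 0 (0 + 1) = [(0 : ℤ)] := by decide
      rw [hA0]
      have hconda : (PySem.Str.slice l1 (some (0 : ℤ)) (some ((0 : ℤ) + (l2.toList.length : ℤ))) == l2) = false := by
        rw [show (0 : ℤ) = ((0 : ℕ) : ℤ) from Nat.cast_zero.symm, condA_inner l1 l2 0]
        apply decide_eq_false
        intro h
        have hlen := congrArg List.length h
        rw [List.length_take, List.length_drop] at hlen
        omega
      have hAnil : List.filter
          (fun pos => PySem.Str.slice l1 (some pos) (some (pos + (l2.toList.length : ℤ))) == l2)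
          [(0 : ℤ)] = [] := by
        simp only [List.filter_cons, List.filter_nil, hconda]
        simp
      rw [hAnil]
      have hBnil : (List.range (l2.toList ++ Char.ofNat 0 :: l1.toList).length).filter
          (fun i => decide (2 * l2.toList.length ≤ i ∧
            (l1.toList.drop (i - 2 * l2.toList.length)).take l2.toList.length = l2.toList)) = [] := by
        rw [List.filter_eq_nil_iff]
        intro b hb
        simp only [decide_eq_true_eq]
        rintro ⟨h2L, hEq⟩
        have hlen := congrArg List.length hEq
        rw [List.length_take, List.length_drop] at hlen
        omega
      rw [hBnil]
      simp
  · -- overlap lists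
    have hK : (pvBuildPi (l2.toList ++ Char.ofNat 0 :: l1.toList)).getD
        ((l2.toList ++ Char.ofNat 0 :: l1.toList).length - 1) 0 =
        pvMaxBord (l2.toList ++ Char.ofNat 0 :: l1.toList) := by
      have := hpi ((l2.toList ++ Char.ofNat 0 :: l1.toList).length - 1) (by omega)
      rwa [show (l2.toList ++ Char.ofNat 0 :: l1.toList).length - 1 + 1 =
            (l2.toList ++ Char.ofNat 0 :: l1.toList).length by omega,
          List.take_length] at this
    rw [hK, chain_spec l2.toList l1.toList (pvBuildPi (l2.toList ++ Char.ofNat 0 :: l1.toList)) hpi _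
          (Or.inr (maxBord_mem htne)), List.reverse_reverse]
    rw [← Nat.cast_min]
    have hr2 : PySem.List.pyRange 1 ((min l1.toList.length l2.toList.length : ℕ) : ℤ) =
        (List.range (min l1.toList.length l2.toList.length - 1)).map (fun (k : Nat) => (1 : ℤ) + (k : ℤ)) := by
      rw [PySem.List.pyRange_one,
          show (((min l1.toList.length l2.toList.length : ℕ) : ℤ) - 1).toNat =
            min l1.toList.length l2.toList.length - 1 by omega]
    rw [hr2, List.filter_map, List.map_map]
    have hBred : (List.range' 1 (pvMaxBord (l2.toList ++ Char.ofNat 0 :: l1.toList))).filter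
        (fun b => pvBordB (l2.toList ++ Char.ofNat 0 :: l1.toList) b &&
          decide (b < l1.toList.length) && decide (b < l2.toList.length)) =
        (List.range' 1 (min l1.toList.length l2.toList.length - 1)).filter
        (fun b => pvBordB (l2.toList ++ Char.ofNat 0 :: l1.toList) b &&
          decide (b < l1.toList.length) && decide (b < l2.toList.length)) := by
      rcases Nat.lt_or_ge (min l1.toList.length l2.toList.length - 1)
          (pvMaxBord (l2.toList ++ Char.ofNat 0 :: l1.toList)) with hKm | hKm
      · rw [filter_range'_ext _ (min l1.toList.length l2.toList.length - 1)
            (pvMaxBord (l2.toList ++ Char.ofNat 0 :: l1.toList)) (by omega) ?_]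
        intro b hb1 hb2
        have hor : ¬ (b < l1.toList.length) ∨ ¬ (b < l2.toList.length) := by omega
        rcases hor with h | h <;>
          simp only [decide_eq_false h, Bool.and_false, Bool.false_and]
      · rw [filter_range'_ext _ (pvMaxBord (l2.toList ++ Char.ofNat 0 :: l1.toList))
            (min l1.toList.length l2.toList.length - 1) hKm ?_]
        intro b hb1 hb2
        cases hq : pvBordB (l2.toList ++ Char.ofNat 0 :: l1.toList) b
        · simp only [Bool.false_and]
        · exact absurd (maxBord_max hq) (by omega)
    rw [hBred, List.range'_eq_map_range, List.filter_map, List.map_map]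
    have hpred2 : ∀ p ∈ List.range (min l1.toList.length l2.toList.length - 1),
        ((fun k => PySem.Str.slice l1 (some (-k)) none == PySem.Str.slice l2 none (some k)) ∘
          (fun (k : Nat) => (1 : ℤ) + (k : ℤ))) p
        = ((fun b => pvBordB (l2.toList ++ Char.ofNat 0 :: l1.toList) b &&
            decide (b < l1.toList.length) && decide (b < l2.toList.length)) ∘ (fun x => 1 + x)) p := by
      intro p hp
      have hpm := List.mem_range.mp hp
      have h1p1 : 1 + p < l1.toList.length := by omega
      have h1p2 : 1 + p < l2.toList.length := by omega
      simp only [Function.comp]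
      rw [show (1 : ℤ) + (p : ℤ) = ((1 + p : ℕ) : ℤ) by push_cast; ring,
          condA_over l1 l2 (1 + p) (by omega)]
      rw [Bool.eq_iff_iff, decide_eq_true_eq]
      simp only [Bool.and_eq_true, decide_eq_true_eq]
      constructor
      · intro h
        exact ⟨⟨(bord_t_iff l2.toList l1.toList (1 + p) h1p1 h1p2).mpr h, h1p1⟩, h1p2⟩
      · rintro ⟨⟨hb, -⟩, -⟩
        exact (bord_t_iff l2.toList l1.toList (1 + p) h1p1 h1p2).mp hb
    rw [List.filter_congr hpred2]
    apply List.map_congr_left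
    intro p hp
    simp only [Function.comp]
    rw [show ((1 + p : ℕ) : ℤ) = (1 : ℤ) + (p : ℤ) by push_cast; ring]
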